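-- pv_equiv track=rewrite | github.com/M4rqu1705/Data-Structures-and-Algorithms | Practice Tests/Exam 1/M4rqu1705/problem2.py | isPartition
-- ===== SOURCE A (Python) =====
-- def isPartition(theSets, B):
--     # Helper set used to accumulate all sets and finally compare criteria 3
--     accumulation = set()
--
--     # O(n)
--     for i in range(len(theSets)):
--
--         # O(1)
--         # Criteria 1: Set s_i is not empty
--         if len(theSets[i]) == 0:
--             return False
--
--         # O(n*m * m) = O(n*m²)
--         # Criteria 2: s_i and s_j do not have elements in common
--         if len(accumulation.intersection(theSets[i])) != 0:
--             return False
--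
--         # O(n*m * m) = O(n*m²)
--         # Add all elements of s_i to accumulation
--         accumulation = accumulation.union(theSets[i])
--
--     #O(k * n*m)
--     # Criteria 3: B = s_1 U s_2 U s_3 U ... U s_n
--     # Return boolean to check if one is subset of another AND both sets have same length
--     return B.issubset(accumulation) and len(B) == len(accumulation)
-- ===== SOURCE B (Python) =====
-- def isPartition(theSets, B):
--     # Counting-identity reimplementation: the sets are pairwise disjoint
--     # exactly when the sum of their sizes equals the size of their union.
--     if any(len(set(s)) == 0 for s in theSets):
--         return False
--     union = set().union(*theSets)
--     total = sum(len(set(s)) for s in theSets)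
--     if total != len(union):
--         return False
--     return B.issubset(union) and len(B) == len(union)
-- ===== Notes on version B (the rewrite author's own statement) =====
-- stated objective: alternative
-- what changed: Replaces A's incremental accumulate-and-intersect loop (early return on the first overlap) by a one-shot counting identity: build the whole union at once and detect overlap by comparing the sum of the sets' sizes with the size of the union.
import Mathlib
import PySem

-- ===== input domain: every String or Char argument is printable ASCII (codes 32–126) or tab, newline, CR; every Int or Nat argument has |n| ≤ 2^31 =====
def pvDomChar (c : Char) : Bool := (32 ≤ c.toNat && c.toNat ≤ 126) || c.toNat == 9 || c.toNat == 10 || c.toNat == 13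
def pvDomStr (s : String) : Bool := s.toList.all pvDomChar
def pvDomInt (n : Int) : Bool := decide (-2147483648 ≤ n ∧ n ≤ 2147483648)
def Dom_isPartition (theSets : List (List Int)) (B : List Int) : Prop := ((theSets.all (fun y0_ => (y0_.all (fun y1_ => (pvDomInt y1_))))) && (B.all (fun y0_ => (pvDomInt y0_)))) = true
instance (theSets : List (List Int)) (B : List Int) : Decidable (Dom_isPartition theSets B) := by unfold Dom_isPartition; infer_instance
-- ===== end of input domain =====

-- B replaces A's incremental accumulate-and-intersect loop by a one-shot counting identity
-- (sum of the sets' sizes equals the size of their union iff they are pairwise disjoint);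
-- same asymptotic cost, genuinely different algorithm.


-- ===== PORT A =====
-- A's for-loop with its two early 'return False's, as structural recursion over the sets
-- (each argument set is a Python set, so it enters as PySem.Set.ofList of its element list).
def pvLoopA (acc : PySem.Set Int) : List (List Int) → Option (PySem.Set Int)
  | [] => some acc
  | s :: rest =>
    let si := PySem.Set.ofList s
    if si.length = 0 then none
    else if (PySem.Set.inter acc si).length ≠ 0 then none
    else pvLoopA (PySem.Set.union acc si) rest

def isPartition (theSets : List (List Int)) (B : List Int) : Bool :=
  match pvLoopA PySem.Set.empty theSets with
  | none => false
  | some acc =>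
      PySem.Set.issubset (PySem.Set.ofList B) acc
        && ((PySem.Set.ofList B).length == acc.length)

-- ===== PORT B =====
def isPartition_alt (theSets : List (List Int)) (B : List Int) : Bool :=
  if theSets.any (fun s => (PySem.Set.ofList s).length == 0) then false
  else
    let u := theSets.foldl (fun u s => PySem.Set.union u (PySem.Set.ofList s)) PySem.Set.empty
    let total : Int := (theSets.map (fun s => ((PySem.Set.ofList s).length : Int))).sum
    if total ≠ (u.length : Int) then false
    else
      PySem.Set.issubset (PySem.Set.ofList B) u
        && ((PySem.Set.ofList B).length == u.length)

-- ===== PRECONDITION & SPEC =====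
def Spec_isPartition (theSets : List (List Int)) (B : List Int) (out : Bool) : Prop := out = isPartition_alt theSets B
instance (theSets : List (List Int)) (B : List Int) (out : Bool) : Decidable (Spec_isPartition theSets B out) := by unfold Spec_isPartition; infer_instance

-- ===== CLAIM (what is proved, stated in full; the proofs are below) =====
def Claim_equal_isPartition : Prop := ∀ (theSets : List (List Int)) (B : List Int), Dom_isPartition theSets B → Spec_isPartition theSets B (isPartition theSets B)

-- ===== LEMMAS AND PROOFS =====

-- the union accumulated by either program, and the total size count used by B
def pvF (acc : PySem.Set Int) (sets : List (List Int)) : PySem.Set Int :=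
  sets.foldl (fun u s => PySem.Set.union u (PySem.Set.ofList s)) acc

def pvT (sets : List (List Int)) : Nat :=
  (sets.map (fun s => (PySem.Set.ofList s).length)).sum

lemma pvT_int (sets : List (List Int)) :
    (sets.map (fun s => ((PySem.Set.ofList s).length : Int))).sum = ((pvT sets : Nat) : Int) := by
  induction sets with
  | nil => simp [pvT]
  | cons s rest ih =>
    simp only [List.map_cons, List.sum_cons, ih, pvT] at *
    push_cast
    ring

lemma pv_toFinset_union (s : PySem.Set Int) (t : List Int) :
    (PySem.Set.union s t).toFinset = s.toFinset ∪ t.toFinset := by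
  ext x; simp [List.mem_toFinset, PySem.Set.mem_union]

lemma pv_toFinset_ofList (xs : List Int) :
    (PySem.Set.ofList xs).toFinset = xs.toFinset := by
  ext x; simp [List.mem_toFinset, PySem.Set.mem_ofList]

lemma pv_len_card (l : List Int) (h : l.Nodup) : l.length = l.toFinset.card :=
  (List.toFinset_card_of_nodup h).symm

lemma pv_inter_empty_iff (acc : PySem.Set Int) (t : List Int) :
    (PySem.Set.inter acc t).length = 0 ↔ Disjoint acc.toFinset t.toFinset := by
  rw [List.length_eq_zero_iff, List.eq_nil_iff_forall_not_mem, Finset.disjoint_left]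
  constructor
  · intro h x hx hx'
    exact h x (by rw [PySem.Set.mem_inter]; exact ⟨List.mem_toFinset.mp hx, List.mem_toFinset.mp hx'⟩)
  · intro h x hx
    rw [PySem.Set.mem_inter] at hx
    exact h (List.mem_toFinset.mpr hx.1) (List.mem_toFinset.mpr hx.2)

lemma pv_nodup_union (s : PySem.Set Int) (t : List Int) (h : s.Nodup) :
    (PySem.Set.union s t).Nodup := PySem.Set.nodup_union _ _ h

lemma pv_union_len_eq (acc : PySem.Set Int) (t : List Int) (h : acc.Nodup)
    (hd : Disjoint acc.toFinset t.toFinset) :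
    (PySem.Set.union acc (PySem.Set.ofList t)).length
      = acc.length + (PySem.Set.ofList t).length := by
  rw [pv_len_card _ (pv_nodup_union _ _ h), pv_toFinset_union, pv_toFinset_ofList,
      pv_len_card _ h, pv_len_card _ (PySem.Set.nodup_ofList t), pv_toFinset_ofList]
  exact Finset.card_union_of_disjoint hd

lemma pv_union_len_lt (acc : PySem.Set Int) (t : List Int) (h : acc.Nodup)
    (hd : ¬ Disjoint acc.toFinset t.toFinset) :
    (PySem.Set.union acc (PySem.Set.ofList t)).length
      < acc.length + (PySem.Set.ofList t).length := by
  rw [pv_len_card _ (pv_nodup_union _ _ h), pv_toFinset_union, pv_toFinset_ofList,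
      pv_len_card _ h, pv_len_card _ (PySem.Set.nodup_ofList t), pv_toFinset_ofList]
  have hle : (acc.toFinset ∪ t.toFinset).card ≤ acc.toFinset.card + t.toFinset.card :=
    Finset.card_union_le _ _
  have : ¬ (acc.toFinset ∪ t.toFinset).card = acc.toFinset.card + t.toFinset.card := by
    intro he; exact hd (Finset.card_union_eq_card_add_card.mp he)
  omega

lemma pvF_le (sets : List (List Int)) : ∀ acc : PySem.Set Int, acc.Nodup →
    (pvF acc sets).length ≤ acc.length + pvT sets := by
  induction sets with
  | nil => intro acc h; simp [pvF, pvT]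
  | cons s rest ih =>
    intro acc h
    have h1 : (PySem.Set.union acc (PySem.Set.ofList s)).length
        ≤ acc.length + (PySem.Set.ofList s).length := by
      by_cases hd : Disjoint acc.toFinset s.toFinset
      · exact le_of_eq (pv_union_len_eq acc s h hd)
      · exact le_of_lt (pv_union_len_lt acc s h hd)
    have h2 := ih (PySem.Set.union acc (PySem.Set.ofList s)) (pv_nodup_union _ _ h)
    simp only [pvF, List.foldl_cons] at *
    have : pvT (s :: rest) = (PySem.Set.ofList s).length + pvT rest := by
      simp [pvT]
    omega

lemma pvLoopA_none_iff (sets : List (List Int)) : ∀ acc : PySem.Set Int, acc.Nodup →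
    (pvLoopA acc sets = none ↔
      (∃ s ∈ sets, (PySem.Set.ofList s).length = 0)
        ∨ (pvF acc sets).length ≠ acc.length + pvT sets) := by
  induction sets with
  | nil => intro acc h; simp [pvLoopA, pvF, pvT]
  | cons s rest ih =>
    intro acc h
    have hT : pvT (s :: rest) = (PySem.Set.ofList s).length + pvT rest := by simp [pvT]
    have hFc : pvF acc (s :: rest) = pvF (PySem.Set.union acc (PySem.Set.ofList s)) rest := rfl
    by_cases he : (PySem.Set.ofList s).length = 0
    · have hnone : pvLoopA acc (s :: rest) = none := by simp [pvLoopA, he]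
      exact ⟨fun _ => Or.inl ⟨s, List.mem_cons_self, he⟩, fun _ => hnone⟩
    · by_cases hd : Disjoint acc.toFinset s.toFinset
      · have hinter : (PySem.Set.inter acc (PySem.Set.ofList s)).length = 0 := by
          rw [pv_inter_empty_iff, pv_toFinset_ofList]; exact hd
        have hstep : pvLoopA acc (s :: rest)
            = pvLoopA (PySem.Set.union acc (PySem.Set.ofList s)) rest := by
          simp [pvLoopA, he, hinter]
        have hlen := pv_union_len_eq acc s h hd
        rw [hstep, ih (PySem.Set.union acc (PySem.Set.ofList s)) (pv_nodup_union _ _ h)]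
        constructor
        · rintro (⟨t, ht, h0⟩ | hne)
          · exact Or.inl ⟨t, List.mem_cons_of_mem _ ht, h0⟩
          · refine Or.inr ?_
            rw [hFc, hT]
            omega
        · rintro (⟨t, ht, h0⟩ | hne)
          · rcases List.mem_cons.mp ht with rfl | ht'
            · exact absurd h0 he
            · exact Or.inl ⟨t, ht', h0⟩
          · refine Or.inr ?_
            rw [hFc, hT] at hne
            omega
      · have hinter : (PySem.Set.inter acc (PySem.Set.ofList s)).length ≠ 0 := by
          rw [ne_eq, pv_inter_empty_iff, pv_toFinset_ofList]; exact hd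
        have hnone : pvLoopA acc (s :: rest) = none := by
          simp [pvLoopA, he, hinter]
        have hlt := pv_union_len_lt acc s h hd
        have hle := pvF_le rest (PySem.Set.union acc (PySem.Set.ofList s)) (pv_nodup_union _ _ h)
        refine ⟨fun _ => Or.inr ?_, fun _ => hnone⟩
        rw [hFc, hT]
        omega

lemma pvLoopA_some (sets : List (List Int)) : ∀ acc r : PySem.Set Int,
    pvLoopA acc sets = some r → r = pvF acc sets := by
  induction sets with
  | nil => intro acc r hr; simp [pvLoopA] at hr; simp [pvF, hr]
  | cons s rest ih =>
    intro acc r hr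
    by_cases he : (PySem.Set.ofList s).length = 0
    · simp [pvLoopA, he] at hr
    · by_cases hi : (PySem.Set.inter acc (PySem.Set.ofList s)).length = 0
      · have hstep : pvLoopA acc (s :: rest)
            = pvLoopA (PySem.Set.union acc (PySem.Set.ofList s)) rest := by
          simp [pvLoopA, he, hi]
        rw [hstep] at hr
        exact ih _ _ hr
      · simp [pvLoopA, he, hi] at hr

-- ===== VERDICT (by name: the statement is the Claim_ definition above) =====
theorem isPartition_spec : Claim_equal_isPartition := by
  unfold Claim_equal_isPartition
  intro theSets B _
  unfold Spec_isPartition isPartition isPartition_alt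
  have hnil : (PySem.Set.empty : PySem.Set Int).Nodup := List.nodup_nil
  have hiff := pvLoopA_none_iff theSets PySem.Set.empty hnil
  have htot := pvT_int theSets
  have hFu : pvF PySem.Set.empty theSets
      = theSets.foldl (fun u s => PySem.Set.union u (PySem.Set.ofList s)) PySem.Set.empty := rfl
  cases hcase : pvLoopA PySem.Set.empty theSets with
  | none =>
    rcases hiff.mp hcase with ⟨s, hs, h0⟩ | hne
    · have hany : (theSets.any fun s => (PySem.Set.ofList s).length == 0) = true :=
        List.any_eq_true.mpr ⟨s, hs, by simpa using h0⟩
      rw [if_pos hany]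
    · by_cases hany : (theSets.any fun s => (PySem.Set.ofList s).length == 0) = true
      · rw [if_pos hany]
      · rw [if_neg hany]
        simp only [htot]
        have hne' : ((pvT theSets : Nat) : Int)
            ≠ ((theSets.foldl (fun u s => PySem.Set.union u (PySem.Set.ofList s)) PySem.Set.empty).length : Int) := by
          rw [← hFu]
          intro hc
          apply hne
          have h1 : pvT theSets = (pvF PySem.Set.empty theSets).length := by exact_mod_cast hc
          have h0 : (PySem.Set.empty : PySem.Set Int).length = 0 := rfl
          omega
        rw [if_pos hne']
  | some r =>
    have hr : r = theSets.foldl (fun u s => PySem.Set.union u (PySem.Set.ofList s)) PySem.Set.empty :=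
      pvLoopA_some theSets _ _ hcase
    have hnn : pvLoopA PySem.Set.empty theSets ≠ none := by rw [hcase]; simp
    have hnot := (not_iff_not.mpr hiff).mp hnn
    rw [not_or] at hnot
    obtain ⟨hnoempty, hlen⟩ := hnot
    have hlen' : (pvF PySem.Set.empty theSets).length
        = (PySem.Set.empty : PySem.Set Int).length + pvT theSets := not_not.mp hlen
    have hany : ¬ (theSets.any fun s => (PySem.Set.ofList s).length == 0) = true := by
      intro hx
      rcases List.any_eq_true.mp hx with ⟨s, hs, h0⟩
      exact hnoempty ⟨s, hs, by simpa using h0⟩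
    rw [if_neg hany]
    simp only [htot]
    have heq : ((pvT theSets : Nat) : Int)
        = ((theSets.foldl (fun u s => PySem.Set.union u (PySem.Set.ofList s)) PySem.Set.empty).length : Int) := by
      rw [← hFu]
      have h0 : (PySem.Set.empty : PySem.Set Int).length = 0 := rfl
      exact_mod_cast by omega
    rw [if_neg (fun hc => hc heq), hr]
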